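-- pv_equiv track=rewrite | github.com/vedhcet-07/ButterFence-Pro | src/butterfence/policy.py | _find_matching_policy
-- ===== SOURCE A (Python) =====
-- def _find_matching_policy(candidate: str, policies: list[str]) -> str | None:
--     """Find the policy in the list that best matches the candidate text.
--
--     Uses exact match first, then substring containment.
--     """
--     candidate_lower = candidate.strip().lower()
--
--     # Exact match
--     for p in policies:
--         if p.strip().lower() == candidate_lower:
--             return p
--
--     # Substring match
--     for p in policies:
--         p_lower = p.strip().lower()
--         if p_lower in candidate_lower or candidate_lower in p_lower:
--             return p
--
--     return None
-- ===== SOURCE B (Python) =====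
-- def _find_matching_policy(candidate: str, policies: list[str]) -> str | None:
--     """Single pass: return on exact match; record first substring match as fallback."""
--     candidate_lower = candidate.strip().lower()
--     first_substring = None
--     for p in policies:
--         p_lower = p.strip().lower()
--         if p_lower == candidate_lower:
--             return p
--         if first_substring is None and (p_lower in candidate_lower or candidate_lower in p_lower):
--             first_substring = p
--     return first_substring
-- ===== Notes on version B (the rewrite author's own statement) =====
-- stated objective: alternative
-- what changed: Collapses A's two sequential scans into a single loop that returns on an exact match and records the first substring match in a best-so-far accumulator.
import Mathlib
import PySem

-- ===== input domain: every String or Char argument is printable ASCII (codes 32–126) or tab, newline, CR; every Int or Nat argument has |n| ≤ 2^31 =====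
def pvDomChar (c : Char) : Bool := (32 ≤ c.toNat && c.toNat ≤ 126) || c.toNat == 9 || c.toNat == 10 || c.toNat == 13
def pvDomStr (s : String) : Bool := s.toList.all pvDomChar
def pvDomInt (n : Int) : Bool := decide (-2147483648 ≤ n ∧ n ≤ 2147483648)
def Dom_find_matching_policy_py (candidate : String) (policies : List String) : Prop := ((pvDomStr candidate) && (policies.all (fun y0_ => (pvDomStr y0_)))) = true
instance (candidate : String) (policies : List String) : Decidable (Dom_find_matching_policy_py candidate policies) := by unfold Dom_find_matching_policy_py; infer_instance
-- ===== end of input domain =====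

-- B collapses A's two sequential scans into one loop with a first-substring-match accumulator (alternative decomposition, same cost).


-- ===== PORT A =====
-- p.strip().lower()
def pvNorm (s : String) : String := PySem.Str.lower (PySem.Str.strip s)

-- first pass of A: exact match
def pvAExact (cl : String) : List String → Option String
  | [] => none
  | p :: rest => if pvNorm p == cl then some p else pvAExact cl rest

-- second pass of A: substring containment
def pvASub (cl : String) : List String → Option String
  | [] => none
  | p :: rest =>
    let pl := pvNorm p
    if PySem.Str.isIn pl cl || PySem.Str.isIn cl pl then some p else pvASub cl rest

def find_matching_policy_py (candidate : String) (policies : List String) : Option String :=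
  let cl := pvNorm candidate
  match pvAExact cl policies with
  | some p => some p
  | none => pvASub cl policies

-- ===== PORT B =====
-- single loop: return on exact match, record first substring match in the accumulator
def pvAltLoop (cl : String) : List String → Option String → Option String
  | [], acc => acc
  | p :: rest, acc =>
    let pl := pvNorm p
    if pl == cl then some p
    else pvAltLoop cl rest
      (if acc.isNone && (PySem.Str.isIn pl cl || PySem.Str.isIn cl pl) then some p else acc)

def find_matching_policy_py_alt (candidate : String) (policies : List String) : Option String :=
  pvAltLoop (pvNorm candidate) policies none

-- ===== PRECONDITION & SPEC =====
def Spec_find_matching_policy_py (candidate : String) (policies : List String) (out : Option String) : Prop := out = find_matching_policy_py_alt candidate policies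
instance (candidate : String) (policies : List String) (out : Option String) : Decidable (Spec_find_matching_policy_py candidate policies out) := by unfold Spec_find_matching_policy_py; infer_instance

-- ===== CLAIM (what is proved, stated in full; the proofs are below) =====
def Claim_equal_find_matching_policy_py : Prop := ∀ (candidate : String) (policies : List String), Dom_find_matching_policy_py candidate policies → Spec_find_matching_policy_py candidate policies (find_matching_policy_py candidate policies)

-- ===== LEMMAS AND PROOFS =====
-- The one-pass loop with accumulator equals: first exact match, else the accumulator, else
-- the first substring match.
theorem pvAltLoop_eq (cl : String) (l : List String) :
    ∀ acc, pvAltLoop cl l acc =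
      match pvAExact cl l with
      | some p => some p
      | none => match acc with
        | some a => some a
        | none => pvASub cl l := by
  induction l with
  | nil => intro acc; cases acc <;> rfl
  | cons p rest ih =>
    intro acc
    simp only [pvAltLoop, pvAExact, pvASub]
    by_cases he : pvNorm p == cl
    · simp [he]
    · simp only [he, ih]
      cases acc with
      | some a => simp
      | none =>
        by_cases hs : (PySem.Chars.isIn (pvNorm p).toList cl.toList = true ∨
            PySem.Chars.isIn cl.toList (pvNorm p).toList = true)
        · cases hA : pvAExact cl rest <;> simp [hs, PySem.Str.isIn]
        · cases hA : pvAExact cl rest <;> simp [hs, PySem.Str.isIn]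

-- ===== VERDICT (by name: the statement is the Claim_ definition above) =====
theorem find_matching_policy_py_spec : Claim_equal_find_matching_policy_py := by
  intro candidate policies _
  unfold Spec_find_matching_policy_py find_matching_policy_py find_matching_policy_py_alt
  rw [pvAltLoop_eq]
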